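-- pv_equiv track=rewrite | github.com/brunomendesdecarvalho/avaliacao-fim-de-disciplina | ATIVIDADE_FIM_DE_DISCIPLINA_PT2_BRUNO_MENDES/utils.py | vetor_filtrar_negativos
-- ===== SOURCE A (Python) =====
-- def eh_negativo(valor):
--     if abs(valor) != valor:
--         return True
--     else:
--         return False
--
-- def vetor_novo_vetor(tamanho):
--     return [0] * tamanho
--
-- def vetor_filtrar_negativos(vetor):
--     negativos = 0
--     for i in vetor:
--         if eh_negativo(i) == True:
--             negativos += 1
--         else:
--             pass
--
--     cont = 0
--     novo_vetor = vetor_novo_vetor(negativos)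
--
--     while cont < negativos:
--         for i in vetor:
--             if eh_negativo(i) == True:
--                 novo_vetor[cont] = i
--                 cont += 1
--             else:
--                 pass
--
--     return novo_vetor
-- ===== SOURCE B (Python) =====
-- def vetor_filtrar_negativos(vetor):
--     return [i for i in vetor if i < 0]
-- ===== Notes on version B (the rewrite author's own statement) =====
-- stated objective: simpler
-- what changed: Replaces the two-pass scheme (count negatives, preallocate a zero array, re-scan writing by index inside a while loop) with a single list comprehension filtering i < 0 in one pass.
import Mathlib
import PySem

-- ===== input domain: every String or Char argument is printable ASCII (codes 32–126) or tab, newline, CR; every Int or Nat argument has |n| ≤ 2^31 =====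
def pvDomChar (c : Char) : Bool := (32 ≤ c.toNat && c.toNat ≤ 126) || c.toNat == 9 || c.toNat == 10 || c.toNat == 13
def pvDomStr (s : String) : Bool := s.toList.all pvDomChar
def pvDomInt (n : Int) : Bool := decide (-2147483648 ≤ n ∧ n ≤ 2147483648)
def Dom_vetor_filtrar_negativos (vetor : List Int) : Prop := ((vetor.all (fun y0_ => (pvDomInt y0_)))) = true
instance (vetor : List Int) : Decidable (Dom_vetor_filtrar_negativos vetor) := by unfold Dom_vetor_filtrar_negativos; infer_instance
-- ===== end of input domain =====

-- B replaces A's two-pass count/preallocate/index-write scheme with a one-pass list comprehension (simpler).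

-- ===== PORT A =====
-- eh_negativo(valor): True iff abs(valor) != valor
def eh_negativo (valor : Int) : Bool := if |valor| ≠ valor then true else false

-- vetor_novo_vetor(tamanho) = [0] * tamanho (tamanho is never negative at the call site)
def vetor_novo_vetor (tamanho : Int) : List Int := List.replicate tamanho.toNat 0

-- one execution of the inner `for i in vetor` of the while loop; novo_vetor[cont] = i is
-- an in-range list write (cont is always 0 ≤ cont < len at the write), ported as List.set
def pvForPass (vetor : List Int) (st : List Int × Int) : List Int × Int :=
  vetor.foldl (fun (st : List Int × Int) i =>
    if eh_negativo i = true then (st.1.set st.2.toNat i, st.2 + 1) else st) st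

-- the while loop; fuel bounds the iterations (one pass already raises cont to negativos,
-- so the fuel is never exhausted on inputs where Python terminates)
def pvWhile (vetor : List Int) (negativos : Int) : Nat → List Int × Int → List Int
  | 0, st => st.1
  | fuel + 1, st =>
      if st.2 < negativos then pvWhile vetor negativos fuel (pvForPass vetor st)
      else st.1

def vetor_filtrar_negativos (vetor : List Int) : List Int :=
  let negativos : Int := vetor.foldl (fun acc i => if eh_negativo i = true then acc + 1 else acc) 0
  let novo_vetor := vetor_novo_vetor negativos
  pvWhile vetor negativos (negativos.toNat + 1) (novo_vetor, 0)

-- ===== PORT B =====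
def vetor_filtrar_negativos_alt (vetor : List Int) : List Int :=
  vetor.filter (fun i => i < 0)

-- ===== PRECONDITION & SPEC =====
def Spec_vetor_filtrar_negativos (vetor : List Int) (out : List Int) : Prop := out = vetor_filtrar_negativos_alt vetor
instance (vetor : List Int) (out : List Int) : Decidable (Spec_vetor_filtrar_negativos vetor out) := by unfold Spec_vetor_filtrar_negativos; infer_instance

-- ===== CLAIM (what is proved, stated in full; the proofs are below) =====
def Claim_equal_vetor_filtrar_negativos : Prop := ∀ (vetor : List Int), Dom_vetor_filtrar_negativos vetor → Spec_vetor_filtrar_negativos vetor (vetor_filtrar_negativos vetor)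

-- ===== LEMMAS AND PROOFS =====

theorem eh_negativo_eq (i : Int) : eh_negativo i = decide (i < 0) := by
  unfold eh_negativo
  split_ifs with hne
  · have : i < 0 := by
      by_contra h
      exact hne (abs_of_nonneg (by omega))
    simp [this]
  · have : ¬ i < 0 := by
      by_contra h
      rw [abs_of_neg h] at hne
      omega
    simp [this]

theorem count_clean (vetor : List Int) : ∀ acc : Int,
    vetor.foldl (fun acc i => if i < 0 then acc + 1 else acc) acc
      = acc + ((vetor.filter (fun i => i < 0)).length : Int) := by
  induction vetor with
  | nil => intro acc; simp
  | cons a l ih =>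
    intro acc
    simp only [List.foldl_cons, List.filter_cons]
    by_cases h : a < 0
    · simp only [h, if_true, decide_true, List.length_cons, ih]
      push_cast; ring
    · simp [h, ih]

theorem count_foldl (vetor : List Int) :
    vetor.foldl (fun acc i => if eh_negativo i = true then acc + 1 else acc) 0
      = ((vetor.filter (fun i => i < 0)).length : Int) := by
  have hfn : (fun (acc : Int) (i : Int) => if eh_negativo i = true then acc + 1 else acc)
      = fun acc i => if i < 0 then acc + 1 else acc := by
    funext acc i
    rw [eh_negativo_eq]
    simp
  rw [hfn, count_clean]
  omega

theorem step_eq : (fun (st : List Int × Int) (i : Int) =>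
      if eh_negativo i = true then (st.1.set st.2.toNat i, st.2 + 1) else st)
    = fun st i => if i < 0 then (st.1.set st.2.toNat i, st.2 + 1) else st := by
  funext st i
  rw [eh_negativo_eq]
  simp

theorem set_mid (pre rest : List Int) (x y : Int) :
    (pre ++ y :: rest).set pre.length x = pre ++ x :: rest := by
  induction pre with
  | nil => rfl
  | cons p ps ih => simp [ih]

theorem pass_clean (vetor : List Int) : ∀ pre : List Int,
    vetor.foldl (fun (st : List Int × Int) i =>
        if i < 0 then (st.1.set st.2.toNat i, st.2 + 1) else st)
      (pre ++ List.replicate (vetor.filter (fun i => i < 0)).length 0, (pre.length : Int))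
      = (pre ++ vetor.filter (fun i => i < 0),
        (pre.length : Int) + ((vetor.filter (fun i => i < 0)).length : Int)) := by
  induction vetor with
  | nil => intro pre; simp
  | cons a l ih =>
    intro pre
    simp only [List.foldl_cons, List.filter_cons]
    by_cases h : a < 0
    · simp only [h, if_true, decide_true, List.length_cons]
      rw [List.replicate_succ, show ((pre.length : Int)).toNat = pre.length by simp,
          set_mid, show pre ++ a :: List.replicate (l.filter (fun i => i < 0)).length 0
            = (pre ++ [a]) ++ List.replicate (l.filter (fun i => i < 0)).length 0 by simp,
          show (pre.length : Int) + 1 = (((pre ++ [a]).length : Nat) : Int) by simp]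
      rw [ih (pre ++ [a])]
      simp only [List.append_assoc, List.cons_append, List.nil_append, List.length_append,
        List.length_cons, List.length_nil]
      congr 1
      push_cast
      ring
    · simp [h, ih pre]

theorem pvForPass_spec (vetor : List Int) :
    pvForPass vetor (List.replicate (vetor.filter (fun i => i < 0)).length 0, 0)
      = (vetor.filter (fun i => i < 0), ((vetor.filter (fun i => i < 0)).length : Int)) := by
  unfold pvForPass
  rw [step_eq]
  have := pass_clean vetor []
  simpa using this

theorem vfn_eq (vetor : List Int) :
    vetor_filtrar_negativos vetor = vetor.filter (fun i => i < 0) := by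
  unfold vetor_filtrar_negativos
  set f := vetor.filter (fun i => i < 0) with hf
  rw [count_foldl, ← hf]
  simp only [vetor_novo_vetor, Int.toNat_natCast]
  rcases Nat.eq_zero_or_pos f.length with h0 | hpos
  · have : f = [] := List.eq_nil_of_length_eq_zero h0
    simp [pvWhile, this]
  · obtain ⟨m, hm⟩ : ∃ m, f.length = m + 1 := ⟨f.length - 1, by omega⟩
    rw [hm]
    have h1 : pvWhile vetor ((m + 1 : Nat) : Int) (m + 1 + 1)
        (List.replicate (m + 1) 0, 0)
        = pvWhile vetor ((m + 1 : Nat) : Int) (m + 1)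
          (pvForPass vetor (List.replicate (m + 1) 0, 0)) := by
      simp only [pvWhile]
      rw [if_pos (by push_cast; omega)]
    have h2 : pvForPass vetor (List.replicate (m + 1) 0, 0)
        = (f, ((m + 1 : Nat) : Int)) := by
      have := pvForPass_spec vetor
      rw [← hf, hm] at this
      exact this
    rw [h1, h2]
    obtain ⟨k, hk⟩ : ∃ k, m + 1 = k + 1 := ⟨m, rfl⟩
    rw [hk]
    simp only [pvWhile]
    rw [if_neg (by omega)]

-- ===== VERDICT (by name: the statement is the Claim_ definition above) =====
theorem vetor_filtrar_negativos_spec : Claim_equal_vetor_filtrar_negativos := by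
  intro vetor _
  unfold Spec_vetor_filtrar_negativos vetor_filtrar_negativos_alt
  exact vfn_eq vetor
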